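-- pv_equiv track=rewrite | github.com/ggauravky/leetcode-solutions | Weekly Contest/Weekly Contest 498/Q3. Multi Source Flood Fill .py | colorGrid
-- ===== SOURCE A (Python) =====
-- from collections import deque
--
-- def colorGrid(n: int, m: int, sources: list[list[int]]) -> list[list[int]]:
--     # Required variable
--     lenqavirod = sources
--
--     grid = [[0] * m for _ in range(n)]
--     q = deque()
--
--     # Step 1: initialize sources
--     for r, c, color in sources:
--         grid[r][c] = color
--         q.append((r, c))
--
--     directions = [(1,0), (-1,0), (0,1), (0,-1)]
--
--     # Step 2: BFS
--     while q:
--         size = len(q)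
--
--         # To handle same-time updates
--         updates = {}
--
--         for _ in range(size):
--             r, c = q.popleft()
--
--             for dr, dc in directions:
--                 nr, nc = r + dr, c + dc
--
--                 if 0 <= nr < n and 0 <= nc < m:
--                     if grid[nr][nc] == 0:
--                         color = grid[r][c]
--
--                         if (nr, nc) not in updates:
--                             updates[(nr, nc)] = color
--                         else:
--                             updates[(nr, nc)] = max(updates[(nr, nc)], color)
--
--         # Apply updates
--         for (r, c), color in updates.items():
--             grid[r][c] = color
--             q.append((r, c))
--
--     return grid
-- ===== SOURCE B (Python) =====
-- def colorGrid(n: int, m: int, sources: list[list[int]]) -> list[list[int]]: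
--     # Synchronous relaxation ("Jacobi") instead of an explicit BFS queue:
--     # seed the grid, then repeatedly recolor every still-0 cell with the max
--     # of its non-zero neighbours until the grid stops changing.
--     grid = [[0] * m for _ in range(n)]
--     for r, c, color in sources:
--         grid[r][c] = color
--     while True:
--         nxt = [
--             [
--                 grid[r][c]
--                 if grid[r][c] != 0
--                 else max(
--                     (
--                         grid[nr][nc]
--                         for nr, nc in ((r - 1, c), (r + 1, c), (r, c - 1), (r, c + 1))
--                         if 0 <= nr < n and 0 <= nc < m and grid[nr][nc] != 0
--                     ),
--                     default=0,
--                 )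
--                 for c in range(m)
--             ]
--             for r in range(n)
--         ]
--         if nxt == grid:
--             return grid
--         grid = nxt
-- ===== Notes on version B (the rewrite author's own statement) =====
-- stated objective: alternative
-- what changed: Replaces the explicit BFS (deque of frontier cells plus a per-level updates dict with max merging) by a queue-free synchronous relaxation: each round recomputes the whole grid, giving every still-0 cell the max of its non-zero neighbours, and stops at the first fixpoint.
-- outside the precondition, e.g. on colorGrid(2, 2, [[-1, 0, 7], [0, 1, 5]]): A returns [[7, 5], [7, 5]], B returns [[7, 5], [7, 7]]; on colorGrid(1, 2, [[0, 0, 0]]): A does not finish within the time limit, B returns [[0, 0]]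
import Mathlib
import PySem

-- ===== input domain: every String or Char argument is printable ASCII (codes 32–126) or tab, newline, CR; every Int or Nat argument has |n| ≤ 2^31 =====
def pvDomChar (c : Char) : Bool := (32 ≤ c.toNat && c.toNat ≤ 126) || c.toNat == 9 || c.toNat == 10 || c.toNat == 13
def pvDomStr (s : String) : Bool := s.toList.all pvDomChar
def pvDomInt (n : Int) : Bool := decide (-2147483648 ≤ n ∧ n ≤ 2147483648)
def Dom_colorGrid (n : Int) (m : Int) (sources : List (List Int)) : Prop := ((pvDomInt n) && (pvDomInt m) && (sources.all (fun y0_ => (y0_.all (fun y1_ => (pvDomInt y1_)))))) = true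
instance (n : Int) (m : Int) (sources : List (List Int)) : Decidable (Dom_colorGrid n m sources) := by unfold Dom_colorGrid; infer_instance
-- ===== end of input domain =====

-- B replaces A's explicit BFS (deque + per-level updates dict) by a queue-free synchronous
-- relaxation to a fixpoint: each round every still-0 cell takes the max of its non-zero
-- neighbours; equivalence is proved on grids whose sources are in-range triples with non-zero color.

-- ===== PORT A =====
-- shared grid primitives (grid[r][c] read / write, [[0]*m for _ in range(n)])
def pvGridGet (g : List (List Int)) (r c : Int) : Int :=
  PySem.List.pyGetD (PySem.List.pyGetD g r []) c 0

def pvGridSet (g : List (List Int)) (r c : Int) (v : Int) : List (List Int) :=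
  PySem.List.pySetD g r (PySem.List.pySetD (PySem.List.pyGetD g r []) c v)

def pvGrid0 (n m : Int) : List (List Int) :=
  List.replicate n.toNat (List.replicate m.toNat 0)

def pvDirs : List (Int × Int) := [(1,0), (-1,0), (0,1), (0,-1)]

-- Step 1 of A: seed the grid and the queue in source order
def pvAseed (n m : Int) (sources : List (List Int)) : List (List Int) × List (Int × Int) :=
  sources.foldl (fun gq s =>
    match s with
    | [r, c, color] => (pvGridSet gq.1 r c color, gq.2 ++ [(r, c)])
    | _ => (gq.1, gq.2)) (pvGrid0 n m, [])

-- inner body of A's BFS round: one (popped cell, direction) step on the updates dict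
def pvAupd1 (n m : Int) (g : List (List Int)) (rc : Int × Int)
    (u : PySem.Dict (Int × Int) Int) (d : Int × Int) : PySem.Dict (Int × Int) Int :=
  let nr := rc.1 + d.1
  let nc := rc.2 + d.2
  if 0 ≤ nr ∧ nr < n ∧ 0 ≤ nc ∧ nc < m then
    if pvGridGet g nr nc = 0 then
      let color := pvGridGet g rc.1 rc.2
      match u.get? (nr, nc) with
      | none => u.insert (nr, nc) color
      | some old => u.insert (nr, nc) (max old color)
    else u
  else u

-- one BFS round of A: pop every queued cell and collect the updates dict
def pvAupdates (n m : Int) (g : List (List Int)) (q : List (Int × Int)) :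
    PySem.Dict (Int × Int) Int :=
  q.foldl (fun u rc => pvDirs.foldl (pvAupd1 n m g rc) u) PySem.Dict.empty

-- A's while-loop, ported with fuel; under Pre_ every round but the last colors at least one
-- 0-cell, so n*m+2 rounds always suffice (outside Pre_ the Python can loop forever).
def pvAloop (n m : Int) : Nat → List (List Int) → List (Int × Int) → List (List Int)
  | 0, g, _ => g
  | fuel + 1, g, q =>
    if q = [] then g
    else
      let u := pvAupdates n m g q
      let gq := u.items.foldl
        (fun gq e => (pvGridSet gq.1 e.1.1 e.1.2 e.2, gq.2 ++ [e.1])) (g, ([] : List (Int × Int)))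
      pvAloop n m fuel gq.1 gq.2

def colorGrid (n : Int) (m : Int) (sources : List (List Int)) : List (List Int) :=
  let gq := pvAseed n m sources
  pvAloop n m (n.toNat * m.toNat + 2) gq.1 gq.2

-- ===== PORT B =====
-- B: seed the grid (no queue), then synchronous relaxation until the grid stops changing
def pvBseed (n m : Int) (sources : List (List Int)) : List (List Int) :=
  sources.foldl (fun g s =>
    match s with
    | [r, c, color] => pvGridSet g r c color
    | _ => g) (pvGrid0 n m)

def pvNbrs (p : Int × Int) : List (Int × Int) :=
  [(p.1 - 1, p.2), (p.1 + 1, p.2), (p.1, p.2 - 1), (p.1, p.2 + 1)]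

-- the generator feeding Python's max(..., default=0)
def pvNbrVals (n m : Int) (g : List (List Int)) (r c : Int) : List Int :=
  (pvNbrs (r, c)).filterMap (fun t =>
    if (0 ≤ t.1 ∧ t.1 < n ∧ 0 ≤ t.2 ∧ t.2 < m) ∧ pvGridGet g t.1 t.2 ≠ 0 then
      some (pvGridGet g t.1 t.2)
    else none)

def pvBnbrMax (n m : Int) (g : List (List Int)) (r c : Int) : Int :=
  PySem.List.maxD (pvNbrVals n m g r c) (fun x => x) 0

-- one synchronous round: rebuild the whole grid
def pvBstep (n m : Int) (g : List (List Int)) : List (List Int) :=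
  (PySem.List.pyRange 0 n 1).map (fun r =>
    (PySem.List.pyRange 0 m 1).map (fun c =>
      if pvGridGet g r c ≠ 0 then pvGridGet g r c else pvBnbrMax n m g r c))

-- B's 'while True', ported with fuel; every round but the last recolors a 0-cell to a
-- non-zero value, so the fixpoint test fires within n*m+2 rounds on every input.
def pvBloop (n m : Int) : Nat → List (List Int) → List (List Int)
  | 0, g => g
  | fuel + 1, g =>
    let g' := pvBstep n m g
    if g' = g then g else pvBloop n m fuel g'

def colorGrid_alt (n : Int) (m : Int) (sources : List (List Int)) : List (List Int) :=
  pvBloop n m (n.toNat * m.toNat + 2) (pvBseed n m sources)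

-- ===== PRECONDITION & SPEC =====
-- Pre_ is the problem's natural domain: every source is a triple [r, c, color] with
-- in-range non-negative coordinates and color ≠ 0.  Excluded are inputs where A raises
-- (wrong-arity rows: ValueError; out-of-range rows: IndexError), where A can loop forever
-- (a 0-colored source next to an uncolored cell), and Python's negative-index wraparound,
-- where A spreads from the phantom negative coordinates while B spreads from the cell
-- actually written.
def pvPreSrc (n m : Int) (s : List Int) : Bool :=
  match s with
  | [r, c, color] => decide (0 ≤ r ∧ r < n ∧ 0 ≤ c ∧ c < m ∧ color ≠ 0)
  | _ => false

def Pre_colorGrid (n : Int) (m : Int) (sources : List (List Int)) : Prop :=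
  ∀ s ∈ sources, pvPreSrc n m s = true

instance (n : Int) (m : Int) (sources : List (List Int)) : Decidable (Pre_colorGrid n m sources) := by
  unfold Pre_colorGrid; infer_instance

def pvWitness_colorGrid : Int × Int × List (List Int) := (2, 2, [[0, 0, 3], [1, 1, 5]])

def Spec_colorGrid (n : Int) (m : Int) (sources : List (List Int)) (out : List (List Int)) : Prop :=
  out = colorGrid_alt n m sources
instance (n : Int) (m : Int) (sources : List (List Int)) (out : List (List Int)) : Decidable (Spec_colorGrid n m sources out) := by
  unfold Spec_colorGrid; infer_instance

-- ===== CLAIM (what is proved, stated in full; the proofs are below) =====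
def Claim_equal_colorGrid : Prop := ∀ (n : Int) (m : Int) (sources : List (List Int)), Dom_colorGrid n m sources → Pre_colorGrid n m sources → Spec_colorGrid n m sources (colorGrid n m sources)

-- ===== LEMMAS AND PROOFS =====

-- proof-layer vocabulary
def pvInb (n m : Int) (p : Int × Int) : Prop := 0 ≤ p.1 ∧ p.1 < n ∧ 0 ≤ p.2 ∧ p.2 < m
def pvGval (g : List (List Int)) (p : Int × Int) : Int := pvGridGet g p.1 p.2
def pvShaped (n m : Int) (g : List (List Int)) : Prop :=
  g.length = n.toNat ∧ ∀ row ∈ g, row.length = m.toNat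
-- the loop invariant: queued cells are in-range and colored, and every colored cell
-- off the queue has no uncolored in-range neighbour
def pvInv (n m : Int) (g : List (List Int)) (q : List (Int × Int)) : Prop :=
  (∀ p ∈ q, pvInb n m p ∧ pvGval g p ≠ 0) ∧
  (∀ p, pvInb n m p → pvGval g p ≠ 0 → p ∉ q →
    ∀ t ∈ pvNbrs p, pvInb n m t → pvGval g t ≠ 0)

-- grid reading/writing --------------------------------------------------------
theorem pvPyGetD_nonneg {α : Type} (xs : List α) (i : Int) (d : α) (h : 0 ≤ i) :
    PySem.List.pyGetD xs i d = xs.getD i.toNat d := by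
  obtain ⟨k, rfl⟩ := Int.eq_ofNat_of_zero_le h
  simp [PySem.List.pyGetD, List.getD_eq_getElem?_getD]

theorem pvShaped_grid0 (n m : Int) : pvShaped n m (pvGrid0 n m) := by
  refine ⟨by simp [pvGrid0], ?_⟩
  intro row hr
  rw [List.eq_of_mem_replicate hr]
  simp

theorem pvGval_grid0 (n m : Int) (p : Int × Int) : pvGval (pvGrid0 n m) p = 0 := by
  unfold pvGval pvGridGet pvGrid0
  rcases h : PySem.List.pyGet? (List.replicate n.toNat (List.replicate m.toNat (0 : Int))) p.1 with _ | row
  · rcases h2 : PySem.List.pyGet? ([] : List Int) p.2 with _ | v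
    · simp [PySem.List.pyGetD, h, h2]
    · have := PySem.List.mem_of_pyGet?_eq_some _ h2
      simp at this
  · have hrow := List.eq_of_mem_replicate (PySem.List.mem_of_pyGet?_eq_some _ h)
    rcases h2 : PySem.List.pyGet? row p.2 with _ | v
    · simp [PySem.List.pyGetD, h, h2]
    · have hv : v ∈ row := PySem.List.mem_of_pyGet?_eq_some _ h2
      rw [hrow] at hv
      simp [PySem.List.pyGetD, h, h2, List.eq_of_mem_replicate hv]

theorem pvShaped_set (n m : Int) (g : List (List Int)) (t : Int × Int) (v : Int)
    (hs : pvShaped n m g) (ht : pvInb n m t) :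
    pvShaped n m (pvGridSet g t.1 t.2 v) := by
  obtain ⟨h1, h2⟩ := hs
  obtain ⟨ht1, ht2, ht3, ht4⟩ := ht
  unfold pvGridSet
  rw [PySem.List.pySetD_of_nonneg _ _ ht1, PySem.List.pySetD_of_nonneg _ _ ht3,
    pvPyGetD_nonneg _ _ _ ht1]
  constructor
  · simpa using h1
  · intro row hr
    rcases List.mem_or_eq_of_mem_set hr with h | h
    · exact h2 _ h
    · subst h
      rw [List.length_set]
      have hlt : t.1.toNat < g.length := by omega
      rw [List.getD_eq_getElem?_getD, List.getElem?_eq_getElem hlt]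
      exact h2 _ (List.getElem_mem hlt)

theorem pvGval_set (n m : Int) (g : List (List Int)) (t p : Int × Int) (v : Int)
    (hs : pvShaped n m g) (ht : pvInb n m t) (hp : pvInb n m p) :
    pvGval (pvGridSet g t.1 t.2 v) p = if p = t then v else pvGval g p := by
  obtain ⟨h1, h2⟩ := hs
  obtain ⟨ht1, ht2, ht3, ht4⟩ := ht
  obtain ⟨hp1, hp2, hp3, hp4⟩ := hp
  have hti : t.1.toNat < g.length := by omega
  have hrowlen : (g.getD t.1.toNat []).length = m.toNat := by
    rw [List.getD_eq_getElem?_getD, List.getElem?_eq_getElem hti]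
    exact h2 _ (List.getElem_mem hti)
  unfold pvGval pvGridSet pvGridGet
  rw [PySem.List.pySetD_of_nonneg _ _ ht1, PySem.List.pySetD_of_nonneg _ _ ht3,
    pvPyGetD_nonneg _ _ _ ht1, pvPyGetD_nonneg _ _ _ hp1, pvPyGetD_nonneg _ _ _ hp1]
  by_cases hrow : p.1 = t.1
  · rw [hrow]
    rw [List.getD_eq_getElem?_getD, List.getElem?_set, if_pos rfl, if_pos hti]
    simp only [Option.getD_some]
    by_cases hcol : p.2 = t.2
    · have hpt : p = t := Prod.ext hrow hcol
      rw [if_pos hpt, hcol]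
      rw [pvPyGetD_nonneg _ _ _ ht3, List.getD_eq_getElem?_getD, List.getElem?_set,
        if_pos rfl, if_pos (by omega), Option.getD_some]
    · have hpt : p ≠ t := fun h => hcol (by rw [h])
      rw [if_neg hpt]
      rw [pvPyGetD_nonneg _ _ _ hp3, pvPyGetD_nonneg _ _ _ hp3, List.getD_eq_getElem?_getD,
        List.getD_eq_getElem?_getD, List.getElem?_set, if_neg (by omega),
        List.getD_eq_getElem?_getD]
  · have hpt : p ≠ t := fun h => hrow (by rw [h])
    rw [if_neg hpt]
    rw [List.getD_eq_getElem?_getD, List.getElem?_set, if_neg (by omega),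
      ← List.getD_eq_getElem?_getD]

theorem pvEqOfGval (n m : Int) (g1 g2 : List (List Int))
    (h1 : pvShaped n m g1) (h2 : pvShaped n m g2)
    (h : ∀ p, pvInb n m p → pvGval g1 p = pvGval g2 p) : g1 = g2 := by
  obtain ⟨hl1, hr1⟩ := h1
  obtain ⟨hl2, hr2⟩ := h2
  apply List.ext_getElem (by omega)
  intro i hi hi'
  have hri : g1[i].length = m.toNat := hr1 _ (List.getElem_mem hi)
  have hri' : g2[i].length = m.toNat := hr2 _ (List.getElem_mem hi')
  apply List.ext_getElem (by omega)
  intro j hj hj'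
  have hp : pvInb n m ((i : Int), (j : Int)) := by
    constructor; · omega
    constructor; · omega
    constructor; · omega
    · omega
  have := h _ hp
  unfold pvGval pvGridGet at this
  rw [pvPyGetD_nonneg _ _ _ (by omega : (0:Int) ≤ (i : Int)),
    pvPyGetD_nonneg _ _ _ (by omega : (0:Int) ≤ (i : Int))] at this
  simp only [Int.toNat_natCast] at this
  rw [List.getD_eq_getElem?_getD, List.getElem?_eq_getElem hi,
    List.getD_eq_getElem?_getD, List.getElem?_eq_getElem hi'] at this
  simp only [Option.getD_some] at this
  rw [pvPyGetD_nonneg _ _ _ (by omega : (0:Int) ≤ (j : Int)),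
    pvPyGetD_nonneg _ _ _ (by omega : (0:Int) ≤ (j : Int))] at this
  simp only [Int.toNat_natCast] at this
  rw [List.getD_eq_getElem?_getD, List.getElem?_eq_getElem (by omega : j < g1[i].length),
    List.getD_eq_getElem?_getD, List.getElem?_eq_getElem (by omega : j < g2[i].length)] at this
  simpa using this

-- max machinery ---------------------------------------------------------------
def pvFMF (o : Option Int) (l : List Int) : Option Int :=
  l.foldl (fun acc x => match acc with | none => some x | some v => some (max v x)) o

theorem pvFMF_append (o : Option Int) (l1 l2 : List Int) :
    pvFMF o (l1 ++ l2) = pvFMF (pvFMF o l1) l2 := by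
  simp [pvFMF, List.foldl_append]

theorem pvFMF_some_ne_none (l : List Int) : ∀ a, pvFMF (some a) l ≠ none := by
  induction l with
  | nil => intro a; simp [pvFMF]
  | cons x xs ih => intro a; exact ih (max a x)

theorem pvFMF_none_eq_none_iff (l : List Int) : pvFMF none l = none ↔ l = [] := by
  cases l with
  | nil => simp [pvFMF]
  | cons x xs =>
    constructor
    · intro h
      exact absurd h (pvFMF_some_ne_none xs x)
    · intro h; exact absurd h (by simp)

theorem pvFMF_spec_aux (l : List Int) : ∀ a v, pvFMF (some a) l = some v →
    (v = a ∨ v ∈ l) ∧ a ≤ v ∧ ∀ x ∈ l, x ≤ v := by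
  induction l with
  | nil =>
    intro a v h
    simp [pvFMF] at h
    simp [h.symm]
  | cons x xs ih =>
    intro a v h
    have h' : pvFMF (some (max a x)) xs = some v := h
    obtain ⟨hmem, hle, hall⟩ := ih (max a x) v h'
    refine ⟨?_, by omega, ?_⟩
    · rcases hmem with h1 | h1
      · rcases le_total a x with hc | hc
        · right
          have hvx : v = x := by omega
          rw [hvx]
          exact List.mem_cons_self
        · left; omega
      · right; exact List.mem_cons_of_mem _ h1
    · intro y hy
      rcases List.mem_cons.mp hy with h1 | h1
      · omega
      · exact hall y h1

theorem pvFMF_spec (l : List Int) (v : Int) (h : pvFMF none l = some v) :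
    v ∈ l ∧ ∀ x ∈ l, x ≤ v := by
  cases l with
  | nil => simp [pvFMF] at h
  | cons x xs =>
    have h' : pvFMF (some x) xs = some v := h
    obtain ⟨hmem, hle, hall⟩ := pvFMF_spec_aux xs x v h'
    refine ⟨?_, ?_⟩
    · rcases hmem with h1 | h1
      · simp [h1]
      · exact List.mem_cons_of_mem _ h1
    · intro y hy
      rcases List.mem_cons.mp hy with h1 | h1
      · omega
      · exact hall y h1

theorem pvFMF_eq_max? (l1 l2 : List Int) (h : ∀ x, x ∈ l1 ↔ x ∈ l2) :
    pvFMF none l1 = PySem.List.max? l2 (fun x => x) := by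
  rcases h1 : pvFMF none l1 with _ | v1 <;> rcases h2 : PySem.List.max? l2 (fun x : Int => x) with _ | v2
  · rfl
  · have hl1 : l1 = [] := (pvFMF_none_eq_none_iff l1).mp h1
    have hv2 : v2 ∈ l2 := PySem.List.max?_mem h2
    rw [← h v2] at hv2
    rw [hl1] at hv2
    simp at hv2
  · have hl2 : l2 = [] := (PySem.List.max?_eq_none_iff l2 _).mp h2
    obtain ⟨hv1, -⟩ := pvFMF_spec l1 v1 h1
    rw [h v1, hl2] at hv1
    simp at hv1
  · obtain ⟨hv1, hmax1⟩ := pvFMF_spec l1 v1 h1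
    have hv2 : v2 ∈ l2 := PySem.List.max?_mem h2
    have hle1 : v1 ≤ v2 := PySem.List.max?_isMax h2 v1 ((h v1).mp hv1)
    have hle2 : v2 ≤ v1 := hmax1 v2 ((h v2).mpr hv2)
    have : v1 = v2 := le_antisymm hle1 hle2
    rw [this]

-- contributions of A's round --------------------------------------------------
def pvContrib (n m : Int) (g : List (List Int)) (rc : Int × Int) (k : Int × Int) : List Int :=
  pvDirs.filterMap (fun d =>
    if (0 ≤ rc.1 + d.1 ∧ rc.1 + d.1 < n ∧ 0 ≤ rc.2 + d.2 ∧ rc.2 + d.2 < m) ∧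
        pvGridGet g (rc.1 + d.1) (rc.2 + d.2) = 0 ∧ (rc.1 + d.1, rc.2 + d.2) = k then
      some (pvGridGet g rc.1 rc.2)
    else none)

def pvContribs (n m : Int) (g : List (List Int)) (q : List (Int × Int)) (k : Int × Int) : List Int :=
  q.flatMap (fun rc => pvContrib n m g rc k)

theorem pvAupd1_get? (n m : Int) (g : List (List Int)) (rc : Int × Int)
    (u : PySem.Dict (Int × Int) Int) (d k : Int × Int) :
    (pvAupd1 n m g rc u d).get? k =
      pvFMF (u.get? k)
        (if (0 ≤ rc.1 + d.1 ∧ rc.1 + d.1 < n ∧ 0 ≤ rc.2 + d.2 ∧ rc.2 + d.2 < m) ∧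
            pvGridGet g (rc.1 + d.1) (rc.2 + d.2) = 0 ∧ (rc.1 + d.1, rc.2 + d.2) = k then
          [pvGridGet g rc.1 rc.2] else []) := by
  unfold pvAupd1
  by_cases h1 : 0 ≤ rc.1 + d.1 ∧ rc.1 + d.1 < n ∧ 0 ≤ rc.2 + d.2 ∧ rc.2 + d.2 < m
  · rw [if_pos h1]
    by_cases h2 : pvGridGet g (rc.1 + d.1) (rc.2 + d.2) = 0
    · rw [if_pos h2]
      by_cases h3 : ((rc.1 + d.1, rc.2 + d.2) : Int × Int) = k
      · rw [if_pos ⟨h1, h2, h3⟩]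
        rcases hu : u.get? (rc.1 + d.1, rc.2 + d.2) with _ | old
        · have hk : u.get? k = none := by rw [← h3]; exact hu
          rw [PySem.Dict.get?_insert, if_pos h3.symm, hk]
          simp [pvFMF]
        · have hk : u.get? k = some old := by rw [← h3]; exact hu
          rw [PySem.Dict.get?_insert, if_pos h3.symm, hk]
          simp [pvFMF]
      · rw [if_neg (by tauto)]
        rcases hu : u.get? (rc.1 + d.1, rc.2 + d.2) with _ | old <;>
          rw [PySem.Dict.get?_insert, if_neg (fun hh => h3 hh.symm)] <;> rfl
    · rw [if_neg h2, if_neg (by tauto)]; rfl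
  · rw [if_neg h1, if_neg (by tauto)]; rfl

theorem pvAupdates_get? (n m : Int) (g : List (List Int)) (q : List (Int × Int)) (k : Int × Int) :
    (pvAupdates n m g q).get? k = pvFMF none (pvContribs n m g q k) := by
  have inner : ∀ (ds : List (Int × Int)) (rc : Int × Int) (u : PySem.Dict (Int × Int) Int),
      (ds.foldl (pvAupd1 n m g rc) u).get? k = pvFMF (u.get? k)
        (ds.filterMap (fun d =>
          if (0 ≤ rc.1 + d.1 ∧ rc.1 + d.1 < n ∧ 0 ≤ rc.2 + d.2 ∧ rc.2 + d.2 < m) ∧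
              pvGridGet g (rc.1 + d.1) (rc.2 + d.2) = 0 ∧ (rc.1 + d.1, rc.2 + d.2) = k then
            some (pvGridGet g rc.1 rc.2)
          else none)) := by
    intro ds
    induction ds with
    | nil => intro rc u; rfl
    | cons d ds ih =>
      intro rc u
      rw [List.foldl_cons, ih, pvAupd1_get?, ← pvFMF_append, List.filterMap_cons]
      by_cases hc : (0 ≤ rc.1 + d.1 ∧ rc.1 + d.1 < n ∧ 0 ≤ rc.2 + d.2 ∧ rc.2 + d.2 < m) ∧
          pvGridGet g (rc.1 + d.1) (rc.2 + d.2) = 0 ∧ (rc.1 + d.1, rc.2 + d.2) = k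
      · rw [if_pos hc, if_pos hc]; rfl
      · rw [if_neg hc, if_neg hc]; rfl
  have outer : ∀ (qs : List (Int × Int)) (u : PySem.Dict (Int × Int) Int),
      (qs.foldl (fun u rc => pvDirs.foldl (pvAupd1 n m g rc) u) u).get? k =
        pvFMF (u.get? k) (pvContribs n m g qs k) := by
    intro qs
    induction qs with
    | nil => intro u; rfl
    | cons rc qs ih =>
      intro u
      rw [List.foldl_cons, ih]
      show _ = pvFMF (u.get? k) ((rc :: qs).flatMap (fun rc => pvContrib n m g rc k))
      rw [List.flatMap_cons, pvFMF_append, inner]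
      rfl
  rw [pvAupdates, outer]
  rfl

theorem pvAupdates_nodup (n m : Int) (g : List (List Int)) (q : List (Int × Int)) :
    (pvAupdates n m g q).keys.Nodup := by
  have step : ∀ (rc d : Int × Int) (u : PySem.Dict (Int × Int) Int), u.keys.Nodup →
      (pvAupd1 n m g rc u d).keys.Nodup := by
    intro rc d u hu
    unfold pvAupd1
    by_cases h1 : 0 ≤ rc.1 + d.1 ∧ rc.1 + d.1 < n ∧ 0 ≤ rc.2 + d.2 ∧ rc.2 + d.2 < m
    · rw [if_pos h1]
      by_cases h2 : pvGridGet g (rc.1 + d.1) (rc.2 + d.2) = 0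
      · rw [if_pos h2]
        rcases hg : u.get? (rc.1 + d.1, rc.2 + d.2) with _ | old <;>
          exact PySem.Dict.nodup_keys_insert _ _ _ hu
      · rw [if_neg h2]; exact hu
    · rw [if_neg h1]; exact hu
  have inner : ∀ (ds : List (Int × Int)) (rc : Int × Int) (u : PySem.Dict (Int × Int) Int),
      u.keys.Nodup → (ds.foldl (pvAupd1 n m g rc) u).keys.Nodup := by
    intro ds
    induction ds with
    | nil => intro rc u hu; exact hu
    | cons d ds ih => intro rc u hu; exact ih rc _ (step rc d u hu)
  have outer : ∀ (qs : List (Int × Int)) (u : PySem.Dict (Int × Int) Int),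
      u.keys.Nodup → (qs.foldl (fun u rc => pvDirs.foldl (pvAupd1 n m g rc) u) u).keys.Nodup := by
    intro qs
    induction qs with
    | nil => intro u hu; exact hu
    | cons rc qs ih => intro u hu; exact ih _ (inner pvDirs rc u hu)
  exact outer q _ PySem.Dict.nodup_keys_empty

theorem pvMem_contribs (n m : Int) (g : List (List Int)) (q : List (Int × Int)) (k : Int × Int) (v : Int) :
    v ∈ pvContribs n m g q k ↔
      ∃ rc ∈ q, ∃ d ∈ pvDirs, (rc.1 + d.1, rc.2 + d.2) = k ∧ pvInb n m k ∧
        pvGval g k = 0 ∧ v = pvGval g rc := by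
  unfold pvContribs pvContrib
  rw [List.mem_flatMap]
  constructor
  · rintro ⟨rc, hrc, hmem⟩
    obtain ⟨d, hd, heq⟩ := List.mem_filterMap.mp hmem
    by_cases hc : (0 ≤ rc.1 + d.1 ∧ rc.1 + d.1 < n ∧ 0 ≤ rc.2 + d.2 ∧ rc.2 + d.2 < m) ∧
        pvGridGet g (rc.1 + d.1) (rc.2 + d.2) = 0 ∧ (rc.1 + d.1, rc.2 + d.2) = k
    · rw [if_pos hc] at heq
      obtain ⟨h1, h2, h3⟩ := hc
      refine ⟨rc, hrc, d, hd, h3, ?_, ?_, ?_⟩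
      · rw [pvInb, ← h3]; exact h1
      · rw [pvGval, ← h3]; exact h2
      · rw [pvGval]; exact (Option.some.injEq _ _ ▸ heq).symm
    · rw [if_neg hc] at heq; exact absurd heq (by simp)
  · rintro ⟨rc, hrc, d, hd, h3, hik, hk0, hv⟩
    refine ⟨rc, hrc, List.mem_filterMap.mpr ⟨d, hd, ?_⟩⟩
    rw [if_pos ⟨by rw [pvInb, ← h3] at hik; exact hik, by rw [pvGval, ← h3] at hk0; exact hk0, h3⟩]
    rw [hv, pvGval]

theorem pvNbrs_symm (p t : Int × Int) (h : t ∈ pvNbrs p) : p ∈ pvNbrs t := by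
  obtain ⟨a, b⟩ := p
  obtain ⟨x, y⟩ := t
  simp only [pvNbrs, List.mem_cons, Prod.mk.injEq,
    List.not_mem_nil, or_false] at h ⊢
  omega

theorem pvMem_nbrVals (n m : Int) (g : List (List Int)) (k : Int × Int) (v : Int) :
    v ∈ pvNbrVals n m g k.1 k.2 ↔
      ∃ t ∈ pvNbrs k, pvInb n m t ∧ pvGval g t ≠ 0 ∧ v = pvGval g t := by
  unfold pvNbrVals
  rw [List.mem_filterMap]
  have hkk : ((k.1, k.2) : Int × Int) = k := rfl
  rw [hkk]
  constructor
  · rintro ⟨t, ht, heq⟩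
    by_cases hc : (0 ≤ t.1 ∧ t.1 < n ∧ 0 ≤ t.2 ∧ t.2 < m) ∧ pvGridGet g t.1 t.2 ≠ 0
    · rw [if_pos hc] at heq
      exact ⟨t, ht, hc.1, hc.2, (Option.some.injEq _ _ ▸ heq).symm⟩
    · rw [if_neg hc] at heq; exact absurd heq (by simp)
  · rintro ⟨t, ht, hinb, hnz, hv⟩
    refine ⟨t, ht, ?_⟩
    rw [if_pos ⟨hinb, hnz⟩, hv]
    rfl

-- under the invariant, A's contributions to a 0-cell are exactly B's non-zero neighbours
theorem pvContribs_iff_nbrVals (n m : Int) (g : List (List Int)) (q : List (Int × Int))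
    (hinv : pvInv n m g q) (k : Int × Int) (hk : pvInb n m k) (hk0 : pvGval g k = 0) (v : Int) :
    v ∈ pvContribs n m g q k ↔ v ∈ pvNbrVals n m g k.1 k.2 := by
  constructor
  · intro hv
    obtain ⟨rc, hrc, d, hd, htar, -, -, hv'⟩ := (pvMem_contribs n m g q k v).mp hv
    obtain ⟨hin, hnz⟩ := hinv.1 rc hrc
    refine (pvMem_nbrVals n m g k v).mpr ⟨rc, ?_, hin, hnz, hv'⟩
    obtain ⟨a, b⟩ := rc
    obtain ⟨x, y⟩ := d
    obtain ⟨k1, k2⟩ := k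
    simp only [pvDirs, List.mem_cons, Prod.mk.injEq,
      List.not_mem_nil, or_false] at hd
    simp only [Prod.mk.injEq] at htar
    simp only [pvNbrs, List.mem_cons, Prod.mk.injEq,
      List.not_mem_nil, or_false]
    omega
  · intro hv
    obtain ⟨t, ht, hin, hnz, hv'⟩ := (pvMem_nbrVals n m g k v).mp hv
    have htq : t ∈ q := by
      by_contra hnot
      exact (hinv.2 t hin hnz hnot k (pvNbrs_symm _ _ ht) hk) hk0
    refine (pvMem_contribs n m g q k v).mpr
      ⟨t, htq, (k.1 - t.1, k.2 - t.2), ?_, ?_, hk, hk0, hv'⟩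
    · obtain ⟨a, b⟩ := t
      obtain ⟨k1, k2⟩ := k
      simp only [pvNbrs, List.mem_cons, Prod.mk.injEq,
        List.not_mem_nil, or_false] at ht
      simp only [pvDirs, List.mem_cons, Prod.mk.injEq,
        List.not_mem_nil, or_false]
      omega
    · obtain ⟨a, b⟩ := t
      obtain ⟨k1, k2⟩ := k
      simp only [Prod.mk.injEq]
      omega

-- applying the updates dict ---------------------------------------------------
def pvApply (items : List ((Int × Int) × Int)) (g : List (List Int)) : List (List Int) :=
  items.foldl (fun gg e => pvGridSet gg e.1.1 e.1.2 e.2) g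

theorem pvApply_shaped (n m : Int) (items : List ((Int × Int) × Int)) (g : List (List Int))
    (hs : pvShaped n m g) (hk : ∀ e ∈ items, pvInb n m e.1) :
    pvShaped n m (pvApply items g) := by
  induction items generalizing g with
  | nil => exact hs
  | cons e items ih =>
    exact ih _ (pvShaped_set n m g e.1 e.2 hs (hk e (List.mem_cons_self)))
      (fun e' he' => hk e' (List.mem_cons_of_mem _ he'))

theorem pvApply_gval_not_mem (n m : Int) (items : List ((Int × Int) × Int)) (g : List (List Int))
    (p : Int × Int) (hs : pvShaped n m g) (hk : ∀ e ∈ items, pvInb n m e.1)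
    (hp : pvInb n m p) (h : ∀ e ∈ items, e.1 ≠ p) :
    pvGval (pvApply items g) p = pvGval g p := by
  induction items generalizing g with
  | nil => rfl
  | cons e items ih =>
    have hset := pvShaped_set n m g e.1 e.2 hs (hk e (List.mem_cons_self))
    rw [pvApply, List.foldl_cons, ← pvApply,
      ih _ hset (fun e' he' => hk e' (List.mem_cons_of_mem _ he'))
        (fun e' he' => h e' (List.mem_cons_of_mem _ he')),
      pvGval_set n m g e.1 p e.2 hs (hk e (List.mem_cons_self)) hp,
      if_neg (fun hh => h e (List.mem_cons_self) hh.symm)]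

theorem pvApply_gval (n m : Int) (items : List ((Int × Int) × Int)) (g : List (List Int))
    (p : Int × Int) (hs : pvShaped n m g) (hk : ∀ e ∈ items, pvInb n m e.1)
    (hnd : (items.map (·.1)).Nodup) (hp : pvInb n m p) :
    pvGval (pvApply items g) p =
      match items.find? (fun e => e.1 == p) with
      | some e => e.2
      | none => pvGval g p := by
  induction items generalizing g with
  | nil => rfl
  | cons e items ih =>
    have hset := pvShaped_set n m g e.1 e.2 hs (hk e (List.mem_cons_self))
    have hktl : ∀ e' ∈ items, pvInb n m e'.1 :=
      fun e' he' => hk e' (List.mem_cons_of_mem _ he')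
    by_cases he : e.1 = p
    · have hfind : (e :: items).find? (fun e => e.1 == p) = some e := by
        rw [List.find?_cons_of_pos]
        simp [he]
      rw [hfind]
      have hnot : ∀ e' ∈ items, e'.1 ≠ p := by
        intro e' he' hcontra
        have hnd' := hnd
        simp only [List.map_cons, List.nodup_cons] at hnd'
        exact hnd'.1 (he ▸ hcontra ▸ List.mem_map_of_mem he')
      rw [pvApply, List.foldl_cons, ← pvApply,
        pvApply_gval_not_mem n m items _ p hset hktl hp hnot,
        pvGval_set n m g e.1 p e.2 hs (hk e (List.mem_cons_self)) hp,
        if_pos he.symm]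
    · have hfind : (e :: items).find? (fun e => e.1 == p) = items.find? (fun e => e.1 == p) := by
        rw [List.find?_cons_of_neg]
        simp [he]
      rw [hfind]
      have hnd' : (items.map (·.1)).Nodup := by
        simp only [List.map_cons, List.nodup_cons] at hnd
        exact hnd.2
      rw [pvApply, List.foldl_cons, ← pvApply, ih _ hset hktl hnd']
      rcases hf : items.find? (fun e => e.1 == p) with _ | e'
      · rw [hf]
        show pvGval (pvGridSet g e.1.1 e.1.2 e.2) p = pvGval g p
        rw [pvGval_set n m g e.1 p e.2 hs (hk e List.mem_cons_self) hp,
          if_neg (fun hh => he hh.symm)]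
      · rw [hf]

theorem pvFind?_items (u : PySem.Dict (Int × Int) Int) (p : Int × Int) (hnd : u.keys.Nodup) :
    u.items.find? (fun e => e.1 == p) = (u.get? p).map (Prod.mk p) := by
  rcases hf : u.items.find? (fun e => e.1 == p) with _ | e
  · rcases hg : u.get? p with _ | v
    · simp [hf]
    · have hmem := (PySem.Dict.get?_eq_some_iff_mem_items u p v hnd).mp hg
      have := List.find?_eq_none.mp hf _ hmem
      simp at this
  · have h1 := List.find?_some hf
    have h2 := List.mem_of_find?_eq_some hf
    have he1 : e.1 = p := by simpa using h1
    have hg : u.get? p = some e.2 := by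
      apply PySem.Dict.get?_of_mem_items u _ hnd
      rw [← he1]
      exact h2
    rw [hg]
    simp only [Option.map_some]
    have h3 : ((p, e.2) : (Int × Int) × Int) = e := by rw [← he1]
    rw [h3]
    exact hf

-- facts about the items of A's updates dict under the invariant
theorem pvItems_facts (n m : Int) (g : List (List Int)) (q : List (Int × Int))
    (hinv : pvInv n m g q) (e : (Int × Int) × Int) (he : e ∈ (pvAupdates n m g q).items) :
    pvInb n m e.1 ∧ pvGval g e.1 = 0 ∧ e.2 ≠ 0 := by
  have hg : (pvAupdates n m g q).get? e.1 = some e.2 :=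
    PySem.Dict.get?_of_mem_items _ he (pvAupdates_nodup n m g q)
  rw [pvAupdates_get?] at hg
  obtain ⟨hmem, -⟩ := pvFMF_spec _ _ hg
  obtain ⟨rc, hrc, d, hd, htar, hik, hk0, hv⟩ := (pvMem_contribs n m g q e.1 e.2).mp hmem
  refine ⟨hik, hk0, ?_⟩
  rw [hv]
  exact (hinv.1 rc hrc).2

-- B reads pointwise
theorem pvBstep_shaped (n m : Int) (g : List (List Int)) : pvShaped n m (pvBstep n m g) := by
  constructor
  · simp [pvBstep, PySem.List.length_pyRange_one]
  · intro row hr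
    obtain ⟨r, -, hrow⟩ := List.mem_map.mp hr
    rw [← hrow]
    simp [PySem.List.length_pyRange_one]

theorem pvBstep_gval (n m : Int) (g : List (List Int)) (p : Int × Int) (hp : pvInb n m p) :
    pvGval (pvBstep n m g) p =
      if pvGval g p ≠ 0 then pvGval g p else pvBnbrMax n m g p.1 p.2 := by
  obtain ⟨hp1, hp2, hp3, hp4⟩ := hp
  show pvGridGet (pvBstep n m g) p.1 p.2 = _
  unfold pvGridGet pvBstep
  rw [PySem.List.pyGetD_map_pyRange_of_nonneg _ n p.1 _ hp1 hp2,
    PySem.List.pyGetD_map_pyRange_of_nonneg _ m p.2 _ hp3 hp4]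
  rfl

-- the round equality: applying A's updates is B's synchronous step
theorem pvKeys_eq (u : PySem.Dict (Int × Int) Int) : u.keys = u.items.map (·.1) := rfl

theorem pvRound_grid (n m : Int) (g : List (List Int)) (q : List (Int × Int))
    (hs : pvShaped n m g) (hinv : pvInv n m g q) :
    pvApply (pvAupdates n m g q).items g = pvBstep n m g := by
  have hitems : ∀ e ∈ (pvAupdates n m g q).items, pvInb n m e.1 :=
    fun e he => (pvItems_facts n m g q hinv e he).1
  have hnd : ((pvAupdates n m g q).items.map (·.1)).Nodup := by
    rw [← pvKeys_eq]; exact pvAupdates_nodup n m g q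
  apply pvEqOfGval n m _ _ (pvApply_shaped n m _ g hs hitems) (pvBstep_shaped n m g)
  intro p hp
  rw [pvApply_gval n m _ g p hs hitems hnd hp,
    pvFind?_items _ p (pvAupdates_nodup n m g q), pvBstep_gval n m g p hp, pvAupdates_get?]
  by_cases h0 : pvGval g p = 0
  · rw [if_neg (by simp [h0])]
    have hmm := pvFMF_eq_max? (pvContribs n m g q p) (pvNbrVals n m g p.1 p.2)
      (pvContribs_iff_nbrVals n m g q hinv p hp h0)
    rw [hmm]
    rcases hmax : PySem.List.max? (pvNbrVals n m g p.1 p.2) (fun x => x) with _ | v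
    · simp [pvBnbrMax, PySem.List.maxD, hmax, h0]
    · simp [pvBnbrMax, PySem.List.maxD, hmax]
  · rw [if_pos h0]
    have hnil : pvContribs n m g q p = [] := by
      rw [List.eq_nil_iff_forall_not_mem]
      intro v hv
      obtain ⟨rc, hrc, d, hd, htar, hik, hk0, hv'⟩ := (pvMem_contribs n m g q p v).mp hv
      exact h0 hk0
    rw [hnil]
    rfl

theorem pvRound_inv (n m : Int) (g : List (List Int)) (q : List (Int × Int))
    (hs : pvShaped n m g) (hinv : pvInv n m g q) :
    pvInv n m (pvApply (pvAupdates n m g q).items g) ((pvAupdates n m g q).items.map (·.1)) := by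
  have hnodup := pvAupdates_nodup n m g q
  have hitems : ∀ e ∈ (pvAupdates n m g q).items, pvInb n m e.1 :=
    fun e he => (pvItems_facts n m g q hinv e he).1
  have hnd : ((pvAupdates n m g q).items.map (·.1)).Nodup := by
    rw [← pvKeys_eq]; exact hnodup
  have hval_of_mem : ∀ e ∈ (pvAupdates n m g q).items,
      pvGval (pvApply (pvAupdates n m g q).items g) e.1 = e.2 := by
    intro e he
    rw [pvApply_gval n m _ g e.1 hs hitems hnd (hitems e he),
      pvFind?_items _ _ hnodup, PySem.Dict.get?_of_mem_items _ he hnodup]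
    rfl
  have hkeep : ∀ t, pvInb n m t → pvGval g t ≠ 0 →
      pvGval (pvApply (pvAupdates n m g q).items g) t = pvGval g t := by
    intro t hint htnz
    apply pvApply_gval_not_mem n m _ g t hs hitems hint
    intro e he hcontra
    exact htnz (hcontra ▸ (pvItems_facts n m g q hinv e he).2.1)
  constructor
  · intro p hpmem
    obtain ⟨e, he, heq⟩ := List.mem_map.mp hpmem
    subst heq
    have hfacts := pvItems_facts n m g q hinv e he
    refine ⟨hfacts.1, ?_⟩
    rw [hval_of_mem e he]
    exact hfacts.2.2
  · intro p hp hnz hnotq t ht hint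
    by_cases htq0 : pvGval g t = 0
    · -- t is uncoloured in g; show it receives an update
      have hgp : pvGval (pvApply (pvAupdates n m g q).items g) p = pvGval g p := by
        apply pvApply_gval_not_mem n m _ g p hs hitems hp
        intro e he hcontra
        exact hnotq (hcontra ▸ List.mem_map_of_mem he)
      have hgpnz : pvGval g p ≠ 0 := by rw [← hgp]; exact hnz
      have hpq : p ∈ q := by
        by_contra hpnq
        exact (hinv.2 p hp hgpnz hpnq t ht hint) htq0
      have hdmem : ((t.1 - p.1, t.2 - p.2) : Int × Int) ∈ pvDirs := by
        obtain ⟨a, b⟩ := p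
        obtain ⟨x, y⟩ := t
        simp only [pvNbrs, List.mem_cons, Prod.mk.injEq,
          List.not_mem_nil, or_false] at ht
        simp only [pvDirs, List.mem_cons, Prod.mk.injEq,
          List.not_mem_nil, or_false]
        omega
      have htareq : ((p.1 + (t.1 - p.1), p.2 + (t.2 - p.2)) : Int × Int) = t := by
        have h1 : p.1 + (t.1 - p.1) = t.1 := by ring
        have h2 : p.2 + (t.2 - p.2) = t.2 := by ring
        rw [h1, h2]
      have hv : pvGval g p ∈ pvContribs n m g q t :=
        (pvMem_contribs n m g q t _).mpr ⟨p, hpq, _, hdmem, htareq, hint, htq0, rfl⟩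
      rcases hF : pvFMF none (pvContribs n m g q t) with _ | w
      · rw [pvFMF_none_eq_none_iff] at hF
        rw [hF] at hv
        simp at hv
      · have hget : (pvAupdates n m g q).get? t = some w := by rw [pvAupdates_get?, hF]
        have hmemit := (PySem.Dict.get?_eq_some_iff_mem_items _ t w hnodup).mp hget
        have := hval_of_mem (t, w) hmemit
        rw [this]
        obtain ⟨hwmem, -⟩ := pvFMF_spec _ _ hF
        obtain ⟨rc, hrc, -, -, -, -, -, hw⟩ := (pvMem_contribs n m g q t w).mp hwmem
        rw [hw]
        exact (hinv.1 rc hrc).2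
    · rw [hkeep t hint htq0]
      exact htq0

theorem pvBstep_id_of_items_nil (n m : Int) (g : List (List Int)) (q : List (Int × Int))
    (hs : pvShaped n m g) (hinv : pvInv n m g q)
    (h : (pvAupdates n m g q).items = []) : pvBstep n m g = g := by
  apply pvEqOfGval n m _ _ (pvBstep_shaped n m g) hs
  intro p hp
  rw [pvBstep_gval n m g p hp]
  by_cases h0 : pvGval g p = 0
  · rw [if_neg (by simp [h0])]
    have hnil : pvNbrVals n m g p.1 p.2 = [] := by
      rw [List.eq_nil_iff_forall_not_mem]
      intro v hv
      obtain ⟨t, ht, hin, hnz, hv'⟩ := (pvMem_nbrVals n m g p v).mp hv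
      by_cases htq : t ∈ q
      · have hdmem : ((p.1 - t.1, p.2 - t.2) : Int × Int) ∈ pvDirs := by
          obtain ⟨a, b⟩ := t
          obtain ⟨k1, k2⟩ := p
          simp only [pvNbrs, List.mem_cons, Prod.mk.injEq,
            List.not_mem_nil, or_false] at ht
          simp only [pvDirs, List.mem_cons, Prod.mk.injEq,
            List.not_mem_nil, or_false]
          omega
        have htareq : ((t.1 + (p.1 - t.1), t.2 + (p.2 - t.2)) : Int × Int) = p := by
          have h1 : t.1 + (p.1 - t.1) = p.1 := by ring
          have h2 : t.2 + (p.2 - t.2) = p.2 := by ring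
          rw [h1, h2]
        have hcv : pvGval g t ∈ pvContribs n m g q p :=
          (pvMem_contribs n m g q p _).mpr ⟨t, htq, _, hdmem, htareq, hp, h0, rfl⟩
        rcases hF : pvFMF none (pvContribs n m g q p) with _ | w
        · rw [pvFMF_none_eq_none_iff] at hF
          rw [hF] at hcv
          simp at hcv
        · have hget : (pvAupdates n m g q).get? p = some w := by rw [pvAupdates_get?, hF]
          have hmemit := (PySem.Dict.get?_eq_some_iff_mem_items _ p w (pvAupdates_nodup n m g q)).mp hget
          rw [h] at hmemit
          simp at hmemit
      · exact (hinv.2 t hin hnz htq p (pvNbrs_symm _ _ ht) hp) h0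
    rw [h0]
    show PySem.List.maxD (pvNbrVals n m g p.1 p.2) (fun x => x) 0 = 0
    rw [hnil]
    rfl
  · rw [if_pos h0]

theorem pvAloop_nil (n m : Int) (f : Nat) (g : List (List Int)) : pvAloop n m f g [] = g := by
  cases f <;> simp [pvAloop]

-- the main induction: with the invariant, A's loop and B's loop return the same grid
theorem pvLoops_eq (n m : Int) (f : Nat) (g : List (List Int)) (q : List (Int × Int))
    (hs : pvShaped n m g) (hinv : pvInv n m g q) :
    pvAloop n m f g q = pvBloop n m f g := by
  induction f generalizing g q with
  | zero => rfl
  | succ f ih =>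
    show (if q = [] then g
      else
        let u := pvAupdates n m g q
        let gq := u.items.foldl
          (fun gq e => (pvGridSet gq.1 e.1.1 e.1.2 e.2, gq.2 ++ [e.1])) (g, ([] : List (Int × Int)))
        pvAloop n m f gq.1 gq.2) =
      (let g' := pvBstep n m g
       if g' = g then g else pvBloop n m f g')
    by_cases hq : q = []
    · rw [if_pos hq]
      have hb : pvBstep n m g = g :=
        pvBstep_id_of_items_nil n m g q hs hinv (by rw [hq]; rfl)
      simp [hb]
    · rw [if_neg hq]
      have hitems : ∀ e ∈ (pvAupdates n m g q).items, pvInb n m e.1 :=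
        fun e he => (pvItems_facts n m g q hinv e he).1
      have hnd : ((pvAupdates n m g q).items.map (·.1)).Nodup := by
        rw [← pvKeys_eq]; exact pvAupdates_nodup n m g q
      have hfold : (pvAupdates n m g q).items.foldl
          (fun gq e => (pvGridSet gq.1 e.1.1 e.1.2 e.2, gq.2 ++ [e.1])) (g, ([] : List (Int × Int))) =
          (pvApply (pvAupdates n m g q).items g, (pvAupdates n m g q).items.map (·.1)) := by
        rw [PySem.List.foldl_prod_mk (f := fun gg (e : (Int × Int) × Int) => pvGridSet gg e.1.1 e.1.2 e.2)
          (g := fun qq (e : (Int × Int) × Int) => qq ++ [e.1])]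
        rw [PySem.List.foldl_append_singleton_eq_map]
        simp [pvApply]
      show pvAloop n m f ((pvAupdates n m g q).items.foldl
          (fun gq e => (pvGridSet gq.1 e.1.1 e.1.2 e.2, gq.2 ++ [e.1])) (g, ([] : List (Int × Int)))).1
          ((pvAupdates n m g q).items.foldl
          (fun gq e => (pvGridSet gq.1 e.1.1 e.1.2 e.2, gq.2 ++ [e.1])) (g, ([] : List (Int × Int)))).2 =
        (if pvBstep n m g = g then g else pvBloop n m f (pvBstep n m g))
      rw [hfold]
      have hround := pvRound_grid n m g q hs hinv
      by_cases hu : (pvAupdates n m g q).items = []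
      · have hb : pvBstep n m g = g := pvBstep_id_of_items_nil n m g q hs hinv hu
        rw [hu, if_pos hb]
        show pvAloop n m f (pvApply [] g) [] = g
        rw [pvAloop_nil]
        rfl
      · obtain ⟨e, he⟩ := List.exists_mem_of_ne_nil _ hu
        have hfacts := pvItems_facts n m g q hinv e he
        have hne : pvBstep n m g ≠ g := by
          intro hcontra
          have h2 : pvGval (pvApply (pvAupdates n m g q).items g) e.1 = e.2 := by
            rw [pvApply_gval n m _ g e.1 hs hitems hnd hfacts.1,
              pvFind?_items _ _ (pvAupdates_nodup n m g q),
              PySem.Dict.get?_of_mem_items _ (show (e.1, e.2) ∈ _ from he) (pvAupdates_nodup n m g q)]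
            rfl
          rw [hround, hcontra] at h2
          rw [hfacts.2.1] at h2
          exact hfacts.2.2 h2.symm
        rw [if_neg hne, ← hround]
        exact ih _ _ (pvApply_shaped n m _ g hs hitems) (pvRound_inv n m g q hs hinv)

-- seeding ---------------------------------------------------------------------
theorem pvSeed_ind (n m : Int) (srcs : List (List Int)) (g : List (List Int)) (qacc : List (Int × Int))
    (hs : pvShaped n m g) (hq : ∀ p ∈ qacc, pvInb n m p)
    (hiff : ∀ p, pvInb n m p → (pvGval g p ≠ 0 ↔ p ∈ qacc))
    (hpre : ∀ s ∈ srcs, pvPreSrc n m s = true) :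
    (srcs.foldl (fun gq s =>
        match s with
        | [r, c, color] => (pvGridSet gq.1 r c color, gq.2 ++ [(r, c)])
        | _ => (gq.1, gq.2)) (g, qacc)).1 =
      srcs.foldl (fun g s =>
        match s with
        | [r, c, color] => pvGridSet g r c color
        | _ => g) g ∧
    pvShaped n m (srcs.foldl (fun gq s =>
        match s with
        | [r, c, color] => (pvGridSet gq.1 r c color, gq.2 ++ [(r, c)])
        | _ => (gq.1, gq.2)) (g, qacc)).1 ∧
    (∀ p ∈ (srcs.foldl (fun gq s =>
        match s with
        | [r, c, color] => (pvGridSet gq.1 r c color, gq.2 ++ [(r, c)])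
        | _ => (gq.1, gq.2)) (g, qacc)).2, pvInb n m p) ∧
    (∀ p, pvInb n m p →
      (pvGval (srcs.foldl (fun gq s =>
        match s with
        | [r, c, color] => (pvGridSet gq.1 r c color, gq.2 ++ [(r, c)])
        | _ => (gq.1, gq.2)) (g, qacc)).1 p ≠ 0 ↔
       p ∈ (srcs.foldl (fun gq s =>
        match s with
        | [r, c, color] => (pvGridSet gq.1 r c color, gq.2 ++ [(r, c)])
        | _ => (gq.1, gq.2)) (g, qacc)).2)) := by
  induction srcs generalizing g qacc with
  | nil => exact ⟨rfl, hs, hq, hiff⟩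
  | cons s srcs ih =>
    have hhead := hpre s List.mem_cons_self
    rcases s with _ | ⟨r, s⟩
    · simp [pvPreSrc] at hhead
    rcases s with _ | ⟨c, s⟩
    · simp [pvPreSrc] at hhead
    rcases s with _ | ⟨col, s⟩
    · simp [pvPreSrc] at hhead
    rcases s with _ | ⟨x, s⟩
    swap
    · simp [pvPreSrc] at hhead
    simp only [pvPreSrc, decide_eq_true_eq] at hhead
    obtain ⟨hr1, hr2, hc1, hc2, hcol⟩ := hhead
    have hrc : pvInb n m ((r, c) : Int × Int) := ⟨hr1, hr2, hc1, hc2⟩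
    simp only [List.foldl_cons]
    refine ih (pvGridSet g r c col) (qacc ++ [(r, c)]) ?_ ?_ ?_
      (fun s' hs' => hpre s' (List.mem_cons_of_mem _ hs'))
    · exact pvShaped_set n m g (r, c) col hs hrc
    · intro p hp
      rcases List.mem_append.mp hp with h | h
      · exact hq p h
      · rw [List.mem_singleton.mp h]; exact hrc
    · intro p hpinb
      have hv := pvGval_set n m g (r, c) p col hs hrc hpinb
      simp only at hv
      rw [hv]
      by_cases hpe : p = ((r, c) : Int × Int)
      · simp [hpe, hcol]
      · rw [if_neg hpe]
        simp only [List.mem_append, List.mem_singleton, hpe, or_false]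
        exact hiff p hpinb

-- ===== VERDICT (by name: the statement is the Claim_ definition above) =====
theorem colorGrid_spec : Claim_equal_colorGrid := by
  intro n m sources hdom hpre
  show colorGrid n m sources = colorGrid_alt n m sources
  obtain ⟨hBeq, hsh, hqin, hiff⟩ := pvSeed_ind n m sources (pvGrid0 n m) []
    (pvShaped_grid0 n m) (by simp)
    (fun p hp => by simp [pvGval_grid0]) hpre
  have hsh' : pvShaped n m (pvAseed n m sources).1 := hsh
  have hqin' : ∀ p ∈ (pvAseed n m sources).2, pvInb n m p := hqin
  have hiff' : ∀ p, pvInb n m p →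
      (pvGval (pvAseed n m sources).1 p ≠ 0 ↔ p ∈ (pvAseed n m sources).2) := hiff
  have hBeq' : (pvAseed n m sources).1 = pvBseed n m sources := hBeq
  have hinv : pvInv n m (pvAseed n m sources).1 (pvAseed n m sources).2 :=
    ⟨fun p hp => ⟨hqin' p hp, (hiff' p (hqin' p hp)).mpr hp⟩,
     fun p hpi hnz hnot _ _ _ => absurd ((hiff' p hpi).mp hnz) hnot⟩
  show pvAloop n m (n.toNat * m.toNat + 2) (pvAseed n m sources).1 (pvAseed n m sources).2 =
    pvBloop n m (n.toNat * m.toNat + 2) (pvBseed n m sources)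
  rw [pvLoops_eq n m (n.toNat * m.toNat + 2) (pvAseed n m sources).1 (pvAseed n m sources).2 hsh' hinv,
    hBeq']
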